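-- pv_equiv track=rewrite | github.com/mantisEye/Crack-The-Code-v1.0 | solver.py | create_possible_combinations
-- ===== SOURCE A (Python) =====
-- def create_possible_combinations(list_1d, quantity):  # This function is tested, seems to be working properly.
--     # This function takes 2 parameters:
--     # 1- list_1d: 1 dimensional array. It can contain any data type, but in this particular program, the data type is always a number object.
--     # 2- quantity: an integer. It has to be either 1, 2, or 3.
--     # This function will take the 2 parameters and create a 2D array that contain all possible combinations of the elements in...
--     # ... the list_1d, each combination will have the size of the quantity. The function will return the 2D array.
--     # For example:
--     # list_1d = [0, 3, 7, 9], quantity = 3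
--     # the function returns [[0, 3, 7], [0, 3, 9], [0, 7, 9], [3, 7, 9]]
--
--     #let's initialize the 2D array
--     possible_combinations = []
--
--     combination_num = 0
--
--     for t in range(len(list_1d)):
--         if quantity == 1:
--             # if the quantity is 1, then we preform the simple action of taking one element from list_1d and add...
--             # ...it to the sub-array at 'combination_num' within the larger possible_combinations array, and we...
--             # ...don't do anything in the following loops.
--             possible_combinations.append([list_1d[t]])
--             combination_num += 1
--         for tt in range(t+1, len(list_1d)):
--             if quantity == 2:
--                 # however, if quantity is 2, then we preform these simple actions which takes...
--                 # ...into account the the first loop but ignores the next one.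
--                 possible_combinations.append([list_1d[t]])
--                 possible_combinations[combination_num].append(list_1d[tt])
--                 combination_num += 1
--             for ttt in range(tt+1, len(list_1d)):
--                 if quantity == 3:
--                     # moreover, if quantity is 3, then we preform these actions and skip the previous actions but we...
--                     # ...still take into account the previous loops.
--                     possible_combinations.append([list_1d[t]])
--                     possible_combinations[combination_num].append(list_1d[tt])
--                     possible_combinations[combination_num].append(list_1d[ttt])
--                     combination_num += 1
--     return possible_combinations
-- ===== SOURCE B (Python) =====
-- def create_possible_combinations(list_1d, quantity):
--     # Recursive combination builder over the list tail (same index-lexicographic order as A).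
--     if quantity not in (1, 2, 3):
--         return []
--
--     def combs(items, k):
--         if k == 0:
--             return [[]]
--         if not items:
--             return []
--         head, rest = items[0], items[1:]
--         return [[head] + tail for tail in combs(rest, k - 1)] + combs(rest, k)
--
--     return combs(list_1d, quantity)
-- ===== Notes on version B (the rewrite author's own statement) =====
-- stated objective: faster
-- what changed: Replaced the three hard-coded nested index loops (which always iterate all O(n^3) index triples with per-quantity if-guards inside) by one short recursive combination builder over the list tail that only does work proportional to the output.
import Mathlib
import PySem

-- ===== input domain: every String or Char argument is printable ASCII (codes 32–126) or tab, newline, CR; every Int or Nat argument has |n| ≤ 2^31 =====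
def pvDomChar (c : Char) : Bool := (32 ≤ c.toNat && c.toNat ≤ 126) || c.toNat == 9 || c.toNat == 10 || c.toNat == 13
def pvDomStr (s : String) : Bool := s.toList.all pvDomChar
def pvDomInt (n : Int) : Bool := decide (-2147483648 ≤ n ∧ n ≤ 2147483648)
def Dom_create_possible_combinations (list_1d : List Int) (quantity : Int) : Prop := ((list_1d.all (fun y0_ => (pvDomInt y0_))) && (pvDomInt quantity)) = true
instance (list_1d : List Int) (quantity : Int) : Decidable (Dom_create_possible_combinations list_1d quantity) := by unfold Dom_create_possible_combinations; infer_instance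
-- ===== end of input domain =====

-- B replaces A's three fixed nested index loops by one recursive combination builder; objective: simpler.

-- ===== PORT A =====
-- Literal port of A's triple nested index loops. `combination_num` always equals the current
-- length of the accumulator and A's consecutive appends in a branch build one finished sublist,
-- so each branch appends its sublist; list_1d[i] is PySem.List.pyGetD (indices always in range here).
def create_possible_combinations (list_1d : List Int) (quantity : Int) : List (List Int) :=
  (PySem.List.pyRange 0 (list_1d.length : Int) 1).foldl (fun acc t =>
    let acc := if quantity = 1 then acc ++ [[PySem.List.pyGetD list_1d t 0]] else acc
    (PySem.List.pyRange (t + 1) (list_1d.length : Int) 1).foldl (fun acc tt =>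
      let acc := if quantity = 2 then acc ++ [[PySem.List.pyGetD list_1d t 0, PySem.List.pyGetD list_1d tt 0]] else acc
      (PySem.List.pyRange (tt + 1) (list_1d.length : Int) 1).foldl (fun acc ttt =>
        if quantity = 3 then acc ++ [[PySem.List.pyGetD list_1d t 0, PySem.List.pyGetD list_1d tt 0, PySem.List.pyGetD list_1d ttt 0]] else acc)
        acc)
      acc)
    []

-- ===== PORT B =====
-- recursive builder: combinations of size k of a list, index-lexicographic order
def pvCombs : List Int → Nat → List (List Int)
  | _, 0 => [[]]
  | [], _ + 1 => []
  | x :: rest, k + 1 => (pvCombs rest k).map (fun tail => x :: tail) ++ pvCombs rest (k + 1)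

def create_possible_combinations_alt (list_1d : List Int) (quantity : Int) : List (List Int) :=
  if quantity = 1 ∨ quantity = 2 ∨ quantity = 3 then pvCombs list_1d quantity.toNat else []

-- ===== PRECONDITION & SPEC =====
def Spec_create_possible_combinations (list_1d : List Int) (quantity : Int) (out : List (List Int)) : Prop := out = create_possible_combinations_alt list_1d quantity
instance (list_1d : List Int) (quantity : Int) (out : List (List Int)) : Decidable (Spec_create_possible_combinations list_1d quantity out) := by unfold Spec_create_possible_combinations; infer_instance

-- ===== CLAIM (what is proved, stated in full; the proofs are below) =====
def Claim_equal_create_possible_combinations : Prop := ∀ (list_1d : List Int) (quantity : Int), Dom_create_possible_combinations list_1d quantity → Spec_create_possible_combinations list_1d quantity (create_possible_combinations list_1d quantity)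

-- ===== LEMMAS AND PROOFS =====

lemma pvCombs_one (xs : List Int) : pvCombs xs 1 = xs.map (fun x => [x]) := by
  induction xs with
  | nil => rfl
  | cons x rest ih => simp [pvCombs, ih]

lemma pv_drop_lt (xs : List Int) (b : Nat) (y : Int) (rest : List Int)
    (h : xs.drop b = y :: rest) : b < xs.length := by
  by_contra hge
  rw [List.drop_eq_nil_of_le (by omega)] at h
  simp at h

lemma pv_drop_succ (xs : List Int) (b : Nat) (y : Int) (rest : List Int)
    (h : xs.drop b = y :: rest) : xs.drop (b + 1) = rest := by
  have := congrArg List.tail h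
  simpa [List.tail_drop] using this

lemma pv_getD_drop (xs : List Int) (b : Nat) (y : Int) (rest : List Int)
    (h : xs.drop b = y :: rest) : PySem.List.pyGetD xs (b : Int) 0 = y := by
  rw [PySem.List.pyGetD_natCast]
  have h1 : xs[b]? = some y := by
    have h2 : (List.drop b xs)[0]? = xs[b + 0]? := List.getElem?_drop
    rw [h] at h2
    simpa using h2.symm
  simp [List.getD, h1]

lemma pv_drop_nil_len (xs : List Int) (b : Nat) (h : xs.drop b = []) :
    (xs.length : Int) ≤ (b : Int) := by
  rw [List.drop_eq_nil_iff] at h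
  exact_mod_cast h

-- the innermost loop is a no-op whenever its branch's quantity test is false
lemma pv_mid_fixed (xs : List Int) (a : List (List Int)) (i : Int) :
    List.foldl (fun acc tt => List.foldl (fun acc _ => acc) acc
      (PySem.List.pyRange (tt + 1) (xs.length : Int) 1)) a
      (PySem.List.pyRange (i + 1) (xs.length : Int) 1) = a := by
  rw [PySem.List.foldl_congr_mem _ _ (fun (acc : List (List Int)) (_ : Int) => acc) a
    (by intro a' j _; exact List.foldl_fixed _)]
  exact List.foldl_fixed _

-- q = 3, middle loop from index b (with xs.drop b = r): size-2 combinations of r, each prefixed with x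
lemma pv_mid3 (xs : List Int) (x : Int) :
    ∀ (r : List Int) (b : Nat) (acc : List (List Int)), xs.drop b = r →
    List.foldl (fun acc tt =>
      List.foldl (fun acc ttt =>
        acc ++ [[x, PySem.List.pyGetD xs tt 0, PySem.List.pyGetD xs ttt 0]]) acc
        (PySem.List.pyRange (tt + 1) (xs.length : Int) 1)) acc
      (PySem.List.pyRange (b : Int) (xs.length : Int) 1)
    = acc ++ (pvCombs r 2).map (fun tail => x :: tail) := by
  intro r
  induction r with
  | nil =>
    intro b acc h
    rw [PySem.List.pyRange_one_eq_nil (pv_drop_nil_len xs b h)]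
    simp [pvCombs]
  | cons y rest ih =>
    intro b acc h
    have hb := pv_drop_lt xs b y rest h
    have hdrop := pv_drop_succ xs b y rest h
    have hcast : (b : Int) + 1 = ((b + 1 : Nat) : Int) := by push_cast; ring
    rw [PySem.List.pyRange_one_cons (by exact_mod_cast hb), List.foldl_cons]
    simp only [pv_getD_drop xs b y rest h, hcast]
    rw [PySem.List.foldl_pyRange_pyGetD' xs 0 (fun a z => a ++ [[x, y, z]]) acc
      (by exact_mod_cast Nat.zero_le (b + 1))]
    rw [Int.toNat_natCast, hdrop, PySem.List.foldl_append_singleton_eq_map]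
    rw [ih (b + 1) _ hdrop]
    simp [pvCombs, pvCombs_one, List.map_map, Function.comp]

-- q = 3, outer loop from index b: size-3 combinations of xs.drop b
lemma pv_outer3 (xs : List Int) :
    ∀ (r : List Int) (b : Nat) (acc : List (List Int)), xs.drop b = r →
    List.foldl (fun acc t =>
      List.foldl (fun acc tt =>
        List.foldl (fun acc ttt =>
          acc ++ [[PySem.List.pyGetD xs t 0, PySem.List.pyGetD xs tt 0, PySem.List.pyGetD xs ttt 0]]) acc
          (PySem.List.pyRange (tt + 1) (xs.length : Int) 1)) acc
        (PySem.List.pyRange (t + 1) (xs.length : Int) 1)) acc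
      (PySem.List.pyRange (b : Int) (xs.length : Int) 1)
    = acc ++ pvCombs r 3 := by
  intro r
  induction r with
  | nil =>
    intro b acc h
    rw [PySem.List.pyRange_one_eq_nil (pv_drop_nil_len xs b h)]
    simp [pvCombs]
  | cons y rest ih =>
    intro b acc h
    have hb := pv_drop_lt xs b y rest h
    have hdrop := pv_drop_succ xs b y rest h
    have hcast : (b : Int) + 1 = ((b + 1 : Nat) : Int) := by push_cast; ring
    rw [PySem.List.pyRange_one_cons (by exact_mod_cast hb), List.foldl_cons]
    simp only [pv_getD_drop xs b y rest h, hcast]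
    rw [pv_mid3 xs y rest (b + 1) acc hdrop, ih (b + 1) _ hdrop]
    simp [pvCombs]

-- q = 2, middle loop from index b: pairs [x, z] for z in xs.drop b (the innermost loop is a no-op)
lemma pv_mid2 (xs : List Int) (x : Int) (b : Nat) (acc : List (List Int)) :
    List.foldl (fun acc tt =>
      List.foldl (fun acc _ => acc)
        (acc ++ [[x, PySem.List.pyGetD xs tt 0]])
        (PySem.List.pyRange (tt + 1) (xs.length : Int) 1)) acc
      (PySem.List.pyRange (b : Int) (xs.length : Int) 1)
    = acc ++ (xs.drop b).map (fun z => [x, z]) := by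
  rw [PySem.List.foldl_congr_mem _ _
    (fun (acc : List (List Int)) (tt : Int) => acc ++ [[x, PySem.List.pyGetD xs tt 0]]) acc
    (by intro a i _; exact List.foldl_fixed _)]
  rw [PySem.List.foldl_pyRange_pyGetD' xs 0 (fun a z => a ++ [[x, z]]) acc
    (by exact_mod_cast Nat.zero_le b)]
  rw [Int.toNat_natCast, PySem.List.foldl_append_singleton_eq_map]

-- q = 2, outer loop from index b: size-2 combinations of xs.drop b
lemma pv_outer2 (xs : List Int) :
    ∀ (r : List Int) (b : Nat) (acc : List (List Int)), xs.drop b = r →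
    List.foldl (fun acc t =>
      List.foldl (fun acc tt =>
        List.foldl (fun acc _ => acc)
          (acc ++ [[PySem.List.pyGetD xs t 0, PySem.List.pyGetD xs tt 0]])
          (PySem.List.pyRange (tt + 1) (xs.length : Int) 1)) acc
        (PySem.List.pyRange (t + 1) (xs.length : Int) 1)) acc
      (PySem.List.pyRange (b : Int) (xs.length : Int) 1)
    = acc ++ pvCombs r 2 := by
  intro r
  induction r with
  | nil =>
    intro b acc h
    rw [PySem.List.pyRange_one_eq_nil (pv_drop_nil_len xs b h)]
    simp [pvCombs]
  | cons y rest ih =>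
    intro b acc h
    have hb := pv_drop_lt xs b y rest h
    have hdrop := pv_drop_succ xs b y rest h
    have hcast : (b : Int) + 1 = ((b + 1 : Nat) : Int) := by push_cast; ring
    rw [PySem.List.pyRange_one_cons (by exact_mod_cast hb), List.foldl_cons]
    simp only [pv_getD_drop xs b y rest h, hcast]
    rw [pv_mid2 xs y (b + 1) acc, hdrop, ih (b + 1) _ hdrop]
    simp [pvCombs, pvCombs_one, List.map_map, Function.comp]

-- ===== VERDICT (by name: the statement is the Claim_ definition above) =====
theorem create_possible_combinations_spec : Claim_equal_create_possible_combinations := by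
  intro xs q _
  unfold Spec_create_possible_combinations create_possible_combinations create_possible_combinations_alt
  by_cases h1 : q = 1
  · subst h1
    simp only [reduceIte]
    rw [PySem.List.foldl_congr_mem _ _
      (fun (acc : List (List Int)) (t : Int) => acc ++ [[PySem.List.pyGetD xs t 0]]) []
      (by intro a i _; exact pv_mid_fixed xs (a ++ [[PySem.List.pyGetD xs i 0]]) i)]
    rw [PySem.List.foldl_pyRange_zero_pyGetD' xs 0 (fun a z => a ++ [[z]]) [],
      PySem.List.foldl_append_singleton_eq_map]
    simp only [List.nil_append, Int.toNat_one, pvCombs_one]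
    simp
  by_cases h2 : q = 2
  · subst h2
    simp only [reduceIte]
    have := pv_outer2 xs xs 0 [] (by simp)
    simpa using this
  by_cases h3 : q = 3
  · subst h3
    simp only [reduceIte]
    have := pv_outer3 xs xs 0 [] (by simp)
    simpa using this
  · simp only [if_neg h1, if_neg h2, if_neg h3, if_neg (by tauto : ¬(q = 1 ∨ q = 2 ∨ q = 3))]
    rw [PySem.List.foldl_congr_mem _ _ (fun (acc : List (List Int)) (_ : Int) => acc) []
      (by intro a i _; exact pv_mid_fixed xs a i)]
    exact List.foldl_fixed _
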